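-- pv_equiv track=rewrite | github.com/kuun1000/Algorithm | 백준/Gold/13913. 숨바꼭질 4/숨바꼭질 4.py | bfs
-- ===== SOURCE A (Python) =====
-- from collections import deque
--
-- def bfs(n, k):
--     if n >= k:
--         return n - k, list(range(n, k-1, -1))
--
--     max_pos = 2*k + 1
--     visited = [False] * max_pos
--     time = [0] * max_pos
--     prev = [-1] * max_pos
--
--     queue = deque([n])
--     visited[n] = True
--
--     while queue:
--         current = queue.popleft()
--
--         if current == k:
--             break
--
--         for next in (current-1, current+1, current*2):
--             if 0 <= next < len(visited) and not visited[next]: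
--                 visited[next] = True
--                 time[next] = time[current] + 1
--                 prev[next] = current
--                 queue.append(next)
--
--     path = []
--     pos = k
--     while pos != -1:
--         path.append(pos)
--         pos = prev[pos]
--     path.reverse()
--
--     return time[k], path
-- ===== SOURCE B (Python) =====
-- from collections import deque
--
-- def bfs(n, k):
--     if n >= k:
--         return n - k, list(range(n, k-1, -1))
--     visited = [False] * (2*k + 1)
--     visited[n] = True
--     queue = deque([(n, [n])])
--     while queue:
--         current, path = queue.popleft()
--         if current == k:
--             return len(path) - 1, path
--         for nxt in (current-1, current+1, current*2):
--             if 0 <= nxt < len(visited) and not visited[nxt]: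
--                 visited[nxt] = True
--                 queue.append((nxt, path + [nxt]))
-- ===== Notes on version B (the rewrite author's own statement) =====
-- stated objective: simpler
-- what changed: Same BFS frontier, but B carries the path inside each queue entry (position, path-so-far) and returns len(path)-1 and the path directly when k is popped, eliminating A's time and prev arrays and the whole backward reconstruction loop (at the price of copying paths).
-- outside the precondition, e.g. on bfs(-1, 2): A returns (3, [0, 1, 2]), B returns (3, [-1, 0, 1, 2]); on bfs(-2, 2): A returns (0, [2]), B returns None; on bfs(-100, 1): A raises IndexError, B raises IndexError
import Mathlib
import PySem

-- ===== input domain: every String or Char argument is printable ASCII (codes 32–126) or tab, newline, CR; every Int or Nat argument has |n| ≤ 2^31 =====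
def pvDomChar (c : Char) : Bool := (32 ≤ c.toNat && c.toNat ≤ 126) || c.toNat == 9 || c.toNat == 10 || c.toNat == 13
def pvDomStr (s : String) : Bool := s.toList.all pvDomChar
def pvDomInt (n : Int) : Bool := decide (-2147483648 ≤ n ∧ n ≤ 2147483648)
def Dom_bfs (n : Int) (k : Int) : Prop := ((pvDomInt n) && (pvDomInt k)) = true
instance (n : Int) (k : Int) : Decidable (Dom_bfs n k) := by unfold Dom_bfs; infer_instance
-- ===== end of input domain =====

-- B keeps A's BFS order but carries the path inside each queue entry, dropping A's time/prev
-- arrays and the backward reconstruction loop; equivalence is about the return value.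

-- index read/write helpers, exact for the in-range non-negative indices both programs use on Pre_
def igetD {α : Type} (a : Array α) (i : Int) (d : α) : α := if 0 ≤ i then a.getD i.toNat d else d
def iset {α : Type} (a : Array α) (i : Int) (v : α) : Array α := if 0 ≤ i then a.setIfInBounds i.toNat v else a

-- ===== PORT A =====
-- one step of A's inner `for next in (current-1, current+1, current*2)` body
def visitA (current : Int) (st : Array Bool × Array Int × Array Int × List Int) (nxt : Int) :
    Array Bool × Array Int × Array Int × List Int :=
  let (visited, time, prev, queue) := st
  if 0 ≤ nxt ∧ nxt < (visited.size : Int) ∧ igetD visited nxt false = false then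
    (iset visited nxt true, iset time nxt (igetD time current 0 + 1), iset prev nxt current,
     queue ++ [nxt])
  else st

-- A's `while queue` loop (fuel bounds the number of iterations; it is never exhausted on Pre_)
def loopA (k : Int) : Nat → List Int → Array Bool → Array Int → Array Int → Array Int × Array Int
  | 0, _, _, time, prev => (time, prev)
  | _+1, [], _, time, prev => (time, prev)
  | fuel+1, current :: rest, visited, time, prev =>
    if current = k then (time, prev)
    else
      let st := [current - 1, current + 1, current * 2].foldl (visitA current)
                  (visited, time, prev, rest)
      loopA k fuel st.2.2.2 st.1 st.2.1 st.2.2.1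

-- A's reconstruction `while pos != -1: path.append(pos); pos = prev[pos]`
def btLoop : Nat → Array Int → Int → List Int → List Int
  | 0, _, _, acc => acc
  | fuel+1, prev, pos, acc =>
    if pos = -1 then acc else btLoop fuel prev (igetD prev pos (-1)) (acc ++ [pos])

def bfs (n : Int) (k : Int) : Int × List Int :=
  if n ≥ k then (n - k, PySem.List.pyRange n (k-1) (-1))
  else
    let maxPos := 2 * k + 1
    let visited := iset (Array.replicate maxPos.toNat false) n true
    let time : Array Int := Array.replicate maxPos.toNat 0
    let prev : Array Int := Array.replicate maxPos.toNat (-1)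
    let res := loopA k (3 * maxPos.toNat + 3) [n] visited time prev
    let path := btLoop (maxPos.toNat + 1) res.2 k []
    (igetD res.1 k 0, path.reverse)

-- ===== PORT B =====
-- one step of B's inner loop: mark and enqueue (position, extended path)
def visitB (path : List Int) (st : Array Bool × List (Int × List Int)) (nxt : Int) :
    Array Bool × List (Int × List Int) :=
  let (visited, queue) := st
  if 0 ≤ nxt ∧ nxt < (visited.size : Int) ∧ igetD visited nxt false = false then
    (iset visited nxt true, queue ++ [(nxt, path ++ [nxt])])
  else st

def loopB (k : Int) : Nat → List (Int × List Int) → Array Bool → Int × List Int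
  | 0, _, _ => (0, [])
  | _+1, [], _ => (0, [])
  | fuel+1, (current, path) :: rest, visited =>
    if current = k then ((path.length : Int) - 1, path)
    else
      let st := [current - 1, current + 1, current * 2].foldl (visitB path) (visited, rest)
      loopB k fuel st.2 st.1

def bfs_alt (n : Int) (k : Int) : Int × List Int :=
  if n ≥ k then (n - k, PySem.List.pyRange n (k-1) (-1))
  else
    let visited := iset (Array.replicate (2 * k + 1).toNat false) n true
    loopB k (3 * (2 * k + 1).toNat + 3) [(n, [n])] visited

-- ===== PRECONDITION & SPEC =====
-- Pre_ excludes n < 0 with n < k: there A indexes the arrays with a negative position, so it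
-- either raises IndexError or returns an accidental value via Python's negative-index
-- wraparound, and B's natural behaviour there (None or a different accidental path) differs.
def Pre_bfs (n : Int) (k : Int) : Prop := k ≤ n ∨ 0 ≤ n
instance (n : Int) (k : Int) : Decidable (Pre_bfs n k) := by unfold Pre_bfs; infer_instance
def pvWitness_bfs : Int × Int := (3, 10)

def Spec_bfs (n : Int) (k : Int) (out : Int × List Int) : Prop := out = bfs_alt n k
instance (n : Int) (k : Int) (out : Int × List Int) : Decidable (Spec_bfs n k out) := by unfold Spec_bfs; infer_instance

-- ===== CLAIM (what is proved, stated in full; the proofs are below) =====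
def Claim_equal_bfs : Prop := ∀ (n : Int) (k : Int), Dom_bfs n k → Pre_bfs n k → Spec_bfs n k (bfs n k)

-- ===== LEMMAS AND PROOFS =====

-- abbreviation for "cell i is marked visited"
def V (visited : Array Bool) (i : Int) : Bool := igetD visited i false

theorem agetD_toList {α : Type} (a : Array α) (n : Nat) (d : α) :
    a.getD n d = a.toList.getD n d := by
  rcases a with ⟨l⟩
  simp only [Array.getD, List.getD_eq_getElem?_getD]
  split
  · next h => simp [List.getElem?_eq_getElem (by simpa using h)]
  · next h => simp [List.getElem?_eq_none (by simpa using h : l.length ≤ n)]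

theorem igetD_iset_self {α : Type} (a : Array α) (i : Int) (v d : α)
    (h0 : 0 ≤ i) (h : i.toNat < a.size) : igetD (iset a i v) i d = v := by
  simp [igetD, iset, h0, h]

theorem igetD_iset_ne {α : Type} (a : Array α) (i j : Int) (v d : α)
    (hne : j ≠ i) : igetD (iset a i v) j d = igetD a j d := by
  unfold igetD iset
  by_cases hi : 0 ≤ i
  · by_cases hj : 0 ≤ j
    · have hij : i.toNat ≠ j.toNat := by omega
      simp [hi, hj, Array.getD_eq_getD_getElem?, Array.getElem?_setIfInBounds_ne hij]
    · simp [hj]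
  · simp [hi]

theorem size_iset {α : Type} (a : Array α) (i : Int) (v : α) :
    (iset a i v).size = a.size := by
  unfold iset; split <;> simp

-- flipping a genuinely-false in-range cell to true decrements the count of false cells
theorem count_set_true (l : List Bool) (j : Nat) (h : j < l.length) (hf : l[j] = false) :
    (l.set j true).count false + 1 = l.count false := by
  induction l generalizing j with
  | nil => simp at h
  | cons b t ih =>
    cases j with
    | zero => simp_all
    | succ j =>
      simp only [List.set_cons_succ, List.count_cons]
      have := ih j (by simpa using h) (by simpa using hf)
      omega

-- bounded, distinct, non-negative integers: at most m of them
theorem nodup_bounded_length (l : List Int) (m : Nat) (hnd : l.Nodup)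
    (h : ∀ x ∈ l, 0 ≤ x ∧ x < (m : Int)) : l.length ≤ m := by
  have hnd' : (l.map Int.toNat).Nodup := by
    refine List.Nodup.map_on ?_ hnd
    intro a ha b hb hab
    have := (h a ha).1; have := (h b hb).1; omega
  have h1 : (l.map Int.toNat).toFinset.card = l.length := by
    rw [List.toFinset_card_of_nodup hnd']; simp
  have h2 : (l.map Int.toNat).toFinset.card ≤ (Finset.range m).card := by
    refine Finset.card_le_card ?_
    intro x hx
    simp only [List.mem_toFinset, List.mem_map] at hx
    obtain ⟨a, ha, rfl⟩ := hx
    have := h a ha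
    simp only [Finset.mem_range]; omega
  rw [Finset.card_range] at h2; omega

-- the prev-array chain from cell i back to the root, in forward (root-first) order
inductive BT (prev : Array Int) : Int → List Int → Prop
  | base (i : Int) : igetD prev i (-1) = -1 → BT prev i [i]
  | step (i j : Int) (l : List Int) : igetD prev i (-1) = j → j ≠ -1 → BT prev j l →
      BT prev i (l ++ [i])

theorem BT_unique {prev : Array Int} {i : Int} {l₁ l₂ : List Int}
    (h₁ : BT prev i l₁) (h₂ : BT prev i l₂) : l₁ = l₂ := by
  induction h₁ generalizing l₂ with
  | base i hp => cases h₂ with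
    | base => rfl
    | step i' j l hp' hj _ => rw [hp] at hp'; exact absurd hp'.symm hj
  | step i j l hp hj hbt ih => cases h₂ with
    | base i' hp' => rw [hp] at hp'; exact absurd hp' hj
    | step i' j' l' hp' hj' hbt' =>
      rw [hp] at hp'; subst hp'
      rw [ih hbt']

-- writing prev at a cell not on the chain leaves the chain unchanged
theorem BT_stable {prev : Array Int} {i : Int} {l : List Int} (h : BT prev i l)
    (nxt c : Int) (hnot : ∀ j ∈ l, j ≠ nxt) : BT (iset prev nxt c) i l := by
  induction h with
  | base i hp =>
    exact BT.base i (by rw [igetD_iset_ne _ _ _ _ _ (hnot i (by simp))]; exact hp)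
  | step i j l hp hj hbt ih =>
    refine BT.step i j l ?_ hj (ih (fun x hx => hnot x (by simp [hx])))
    rw [igetD_iset_ne _ _ _ _ _ (hnot i (by simp))]; exact hp

-- btLoop computes the reversed chain, given enough fuel
theorem bt_eval {prev : Array Int} {i : Int} {l : List Int} (h : BT prev i l)
    (hpos : ∀ j ∈ l, 0 ≤ j) :
    ∀ fuel acc, l.length ≤ fuel → btLoop fuel prev i acc = acc ++ l.reverse := by
  induction h with
  | base i hp =>
    intro fuel acc hf
    match fuel with
    | 0 => simp at hf
    | f + 1 =>
      have : ¬ (i = -1) := by have := hpos i (by simp); omega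
      simp only [btLoop, if_neg this, hp]
      match f with
      | 0 => simp [btLoop]
      | f + 1 => simp [btLoop]
  | step i j l hp hj hbt ih =>
    intro fuel acc hf
    match fuel with
    | 0 => simp at hf
    | f + 1 =>
      have : ¬ (i = -1) := by have := hpos i (by simp); omega
      simp only [btLoop, if_neg this, hp]
      rw [ih (fun x hx => hpos x (by simp [hx])) f (acc ++ [i]) (by simp at hf ⊢; omega)]
      simp

-- igetD of a replicate list with matching default is always the default
theorem igetD_replicate {α : Type} (m : Nat) (d : α) (i : Int) :
    igetD (Array.replicate m d) i d = d := by
  unfold igetD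
  split
  · rw [agetD_toList, Array.toList_replicate]
    by_cases h : i.toNat < m
    · rw [List.getD_eq_getElem _ _ (by simpa using h)]; simp
    · rw [List.getD_eq_default _ _ (by simpa using h)]
  · rfl

-- invariant linking A's partial inner-fold state to B's, for the popped cell `current`
-- whose B-path is `p`
structure Mid (n k current : Int) (p : List Int) (visited : Array Bool)
    (time prev : Array Int) (qa : List Int) (qb : List (Int × List Int)) : Prop where
  lenv : (visited.size : Int) = 2 * k + 1
  lent : time.size = visited.size
  lenp : prev.size = visited.size
  qcorr : qb.map Prod.fst = qa
  qmem : ∀ q ∈ qa, 0 ≤ q ∧ q < 2 * k + 1 ∧ V visited q = true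
  chain : ∀ i : Int, 0 ≤ i → i < 2 * k + 1 → V visited i = true →
    ∃ l, BT prev i l ∧ (∀ j ∈ l, 0 ≤ j ∧ j < 2 * k + 1 ∧ V visited j = true) ∧ l.Nodup ∧
      igetD time i 0 = (l.length : Int) - 1
  qpath : ∀ qp ∈ qb, BT prev qp.1 qp.2
  cur0 : 0 ≤ current
  curvis : V visited current = true
  curBT : BT prev current p
  curmem : ∀ j ∈ p, 0 ≤ j ∧ j < 2 * k + 1 ∧ V visited j = true
  curnd : p.Nodup
  curtime : igetD time current 0 = (p.length : Int) - 1

-- one neighbour-visit step preserves Mid and the bookkeeping facts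
theorem stepOne (n k current nxt : Int) (p : List Int) (visited : Array Bool)
    (time prev : Array Int) (qa : List Int) (qb : List (Int × List Int))
    (h : Mid n k current p visited time prev qa qb) :
    ∃ v' t' pr' qa' qb',
      visitA current (visited, time, prev, qa) nxt = (v', t', pr', qa') ∧
      visitB p (visited, qb) nxt = (v', qb') ∧
      Mid n k current p v' t' pr' qa' qb' ∧
      (∀ i, V visited i = true → V v' i = true) ∧
      (∃ ext, qa' = qa ++ ext) ∧
      (0 ≤ nxt → nxt < 2 * k + 1 → V v' nxt = true) ∧
      3 * v'.toList.count false + qa'.length ≤ 3 * visited.toList.count false + qa.length ∧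
      (∀ i, V v' i = true → V visited i = true ∨ i ∈ qa') := by
  by_cases hg : 0 ≤ nxt ∧ nxt < (visited.size : Int) ∧ igetD visited nxt false = false
  · obtain ⟨h1, h2, h3⟩ := hg
    have hlt : nxt < 2 * k + 1 := by rw [← h.lenv]; exact h2
    have htn : nxt.toNat < visited.size := by omega
    have hG : (0 ≤ nxt ∧ nxt < (visited.size : Int) ∧ igetD visited nxt false = false) :=
      ⟨h1, h2, h3⟩
    refine ⟨iset visited nxt true, iset time nxt (igetD time current 0 + 1),
      iset prev nxt current, qa ++ [nxt], qb ++ [(nxt, p ++ [nxt])], ?_, ?_, ?_, ?_, ?_, ?_, ?_, ?_⟩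
    · simp [visitA, if_pos hG]
    · simp [visitB, if_pos hG]
    all_goals clear hG
    · -- Mid preserved
      have hVmono : ∀ i, V visited i = true → V (iset visited nxt true) i = true := by
        intro i hi
        by_cases hin : i = nxt
        · subst hin; simpa [V] using igetD_iset_self visited i true false h1 htn
        · simpa [V, igetD_iset_ne visited nxt i true false hin] using hi
      have hVnxt : V (iset visited nxt true) nxt = true := by
        simpa [V] using igetD_iset_self visited nxt true false h1 htn
      have hVnew : ∀ i, V (iset visited nxt true) i = true → i = nxt ∨ V visited i = true := by
        intro i hi
        by_cases hin : i = nxt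
        · exact Or.inl hin
        · exact Or.inr (by simpa [V, igetD_iset_ne visited nxt i true false hin] using hi)
      have hpnot : ∀ j ∈ p, j ≠ nxt := by
        intro j hj hEq
        have := (h.curmem j hj).2.2
        rw [hEq] at this
        simp [V] at this
        rw [this] at h3
        exact absurd h3 (by simp)
      have hcne : current ≠ nxt := by
        intro hEq
        have := h.curvis; rw [hEq] at this; simp [V] at this; rw [this] at h3
        exact absurd h3 (by simp)
      have hBTnew : BT (iset prev nxt current) nxt (p ++ [nxt]) := by
        refine BT.step nxt current p ?_ (by have := h.cur0; omega) (BT_stable h.curBT nxt current hpnot)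
        exact igetD_iset_self prev nxt current (-1) h1 (by rw [h.lenp]; exact htn)
      have hChainSt : ∀ i l, BT prev i l → (∀ j ∈ l, V visited j = true) →
          BT (iset prev nxt current) i l := by
        intro i l hbt hvis
        refine BT_stable hbt nxt current ?_
        intro j hj hEq
        have := hvis j hj; rw [hEq] at this; simp [V] at this; rw [this] at h3
        exact absurd h3 (by simp)
      refine ⟨?_, ?_, ?_, ?_, ?_, ?_, ?_, h.cur0, hVmono _ h.curvis, ?_, ?_, h.curnd, ?_⟩
      · rw [size_iset]; exact h.lenv
      · rw [size_iset, size_iset]; exact h.lent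
      · rw [size_iset, size_iset]; exact h.lenp
      · simp [h.qcorr]
      · intro q hq
        rcases List.mem_append.mp hq with hq | hq
        · obtain ⟨a, b, c⟩ := h.qmem q hq
          exact ⟨a, b, hVmono _ c⟩
        · simp at hq; subst hq; exact ⟨h1, hlt, hVnxt⟩
      · -- chain
        intro i hi0 hiu hiv
        rcases hVnew i hiv with hEq | hiold
        · rw [hEq]; rw [hEq] at hi0
          refine ⟨p ++ [nxt], hBTnew, ?_, ?_, ?_⟩
          · intro j hj
            rcases List.mem_append.mp hj with hj | hj
            · obtain ⟨a, b, c⟩ := h.curmem j hj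
              exact ⟨a, b, hVmono _ c⟩
            · simp at hj; subst hj; exact ⟨h1, hlt, hVnxt⟩
          · simp only [List.nodup_append]
            refine ⟨h.curnd, by simp, ?_⟩
            intro a ha b hb
            simp only [List.mem_singleton] at hb
            subst hb
            exact hpnot a ha
          · rw [igetD_iset_self time nxt _ 0 hi0 (by rw [h.lent]; omega), h.curtime]
            simp
        · obtain ⟨l, hbt, hmem, hnd, htm⟩ := h.chain i hi0 hiu hiold
          refine ⟨l, hChainSt i l hbt (fun j hj => (hmem j hj).2.2), ?_, hnd, ?_⟩
          · intro j hj
            obtain ⟨a, b, c⟩ := hmem j hj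
            exact ⟨a, b, hVmono _ c⟩
          · have hine : i ≠ nxt := by
              intro hEq; rw [hEq] at hiold; simp [V] at hiold; rw [hiold] at h3
              exact absurd h3 (by simp)
            rw [igetD_iset_ne time nxt i _ 0 hine]; exact htm
      · -- qpath
        intro qp hqp
        rcases List.mem_append.mp hqp with hqp | hqp
        · have hq1 : qp.1 ∈ qa := by
            rw [← h.qcorr]; exact List.mem_map.mpr ⟨qp, hqp, rfl⟩
          obtain ⟨a, b, c⟩ := h.qmem qp.1 hq1
          obtain ⟨l, hbt, hmem, hnd, htm⟩ := h.chain qp.1 a b c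
          have hlp : l = qp.2 := BT_unique hbt (h.qpath qp hqp)
          subst hlp
          exact hChainSt qp.1 qp.2 hbt (fun j hj => (hmem j hj).2.2)
        · simp at hqp
          rw [hqp]
          exact hBTnew
      · exact hChainSt current p h.curBT (fun j hj => (h.curmem j hj).2.2)
      · intro j hj
        obtain ⟨a, b, c⟩ := h.curmem j hj
        exact ⟨a, b, hVmono _ c⟩
      · rw [igetD_iset_ne time nxt current _ 0 hcne]; exact h.curtime
    · -- mono
      intro i hi
      by_cases hin : i = nxt
      · subst hin; simpa [V] using igetD_iset_self visited i true false h1 htn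
      · simpa [V, igetD_iset_ne visited nxt i true false hin] using hi
    · exact ⟨[nxt], rfl⟩
    · intro _ _
      simpa [V] using igetD_iset_self visited nxt true false h1 htn
    · -- measure
      have hset : (iset visited nxt true).toList = visited.toList.set nxt.toNat true := by
        simp [iset, h1, Array.toList_setIfInBounds]
      have htn' : nxt.toNat < visited.toList.length := by simpa using htn
      have hfalse : visited.toList[nxt.toNat] = false := by
        have := h3
        simp only [igetD, if_pos h1, agetD_toList] at this
        rwa [List.getD_eq_getElem _ _ htn'] at this
      have := count_set_true visited.toList nxt.toNat htn' hfalse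
      rw [hset]
      simp only [List.length_append, List.length_cons, List.length_nil]
      omega
    · intro i hi
      by_cases hin : i = nxt
      · subst hin; simp
      · exact Or.inl (by simpa [V, igetD_iset_ne visited nxt i true false hin] using hi)
  · refine ⟨visited, time, prev, qa, qb, ?_, ?_, h, fun i hi => hi, ⟨[], by simp⟩, ?_, by omega,
      fun i hi => Or.inl hi⟩
    · simp [visitA, if_neg hg]
    · simp [visitB, if_neg hg]
    · intro hx1 hx2
      have : ¬ (igetD visited nxt false = false) := by
        intro hc; exact hg ⟨hx1, by rw [h.lenv]; exact hx2, hc⟩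
      simp [V]
      simpa using this

-- the three-neighbour fold, pairwise on both sides
theorem foldThree (n k current : Int) (p : List Int) (visited : Array Bool)
    (time prev : Array Int) (qa : List Int) (qb : List (Int × List Int))
    (h : Mid n k current p visited time prev qa qb) :
    ∃ v' t' pr' qa' qb',
      [current - 1, current + 1, current * 2].foldl (visitA current) (visited, time, prev, qa)
        = (v', t', pr', qa') ∧
      [current - 1, current + 1, current * 2].foldl (visitB p) (visited, qb) = (v', qb') ∧
      Mid n k current p v' t' pr' qa' qb' ∧
      (∀ i, V visited i = true → V v' i = true) ∧
      (∃ ext, qa' = qa ++ ext) ∧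
      (0 ≤ current + 1 → current + 1 < 2 * k + 1 → V v' (current + 1) = true) ∧
      3 * v'.toList.count false + qa'.length ≤ 3 * visited.toList.count false + qa.length ∧
      (∀ i, V v' i = true → V visited i = true ∨ i ∈ qa') := by
  obtain ⟨v1, t1, p1, qa1, qb1, eA1, eB1, m1, mo1, ⟨e1, he1⟩, f1, me1, g1⟩ :=
    stepOne n k current (current - 1) p visited time prev qa qb h
  obtain ⟨v2, t2, p2, qa2, qb2, eA2, eB2, m2, mo2, ⟨e2, he2⟩, f2, me2, g2⟩ :=
    stepOne n k current (current + 1) p v1 t1 p1 qa1 qb1 m1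
  obtain ⟨v3, t3, p3, qa3, qb3, eA3, eB3, m3, mo3, ⟨e3, he3⟩, f3, me3, g3⟩ :=
    stepOne n k current (current * 2) p v2 t2 p2 qa2 qb2 m2
  refine ⟨v3, t3, p3, qa3, qb3, ?_, ?_, m3, ?_, ?_, ?_, by omega, ?_⟩
  · simp only [List.foldl_cons, List.foldl_nil, eA1, eA2, eA3]
  · simp only [List.foldl_cons, List.foldl_nil, eB1, eB2, eB3]
  · exact fun i hi => mo3 _ (mo2 _ (mo1 _ hi))
  · exact ⟨e1 ++ (e2 ++ e3), by rw [he3, he2, he1]; simp⟩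
  · exact fun a b => mo3 _ (f2 a b)
  · intro i hi
    rcases g3 i hi with h3 | h3
    · rcases g2 i h3 with h2 | h2
      · rcases g1 i h2 with hh | hh
        · exact Or.inl hh
        · right; rw [he3, he2]; simp [hh]
      · right; rw [he3]; simp [h2]
    · exact Or.inr h3

-- loop invariant relating A's full state to B's between iterations
structure BfsInv (n k : Int) (visited : Array Bool) (time prev : Array Int)
    (qa : List Int) (qb : List (Int × List Int)) : Prop where
  lenv : (visited.size : Int) = 2 * k + 1
  lent : time.size = visited.size
  lenp : prev.size = visited.size
  qcorr : qb.map Prod.fst = qa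
  qmem : ∀ q ∈ qa, 0 ≤ q ∧ q < 2 * k + 1 ∧ V visited q = true
  chain : ∀ i : Int, 0 ≤ i → i < 2 * k + 1 → V visited i = true →
    ∃ l, BT prev i l ∧ (∀ j ∈ l, 0 ≤ j ∧ j < 2 * k + 1 ∧ V visited j = true) ∧ l.Nodup ∧
      igetD time i 0 = (l.length : Int) - 1
  qpath : ∀ qp ∈ qb, BT prev qp.1 qp.2
  kq : V visited k = true → k ∈ qa
  nvis : V visited n = true
  prog : ∀ i : Int, n ≤ i → i < k → V visited i = true → (V visited (i + 1) = true ∨ i ∈ qa)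

-- the two loops agree (A's loop result read back through the reconstruction)
theorem mainLoop (n k : Int) (hk : n < k) (fuel : Nat) :
    ∀ (visited : Array Bool) (time prev : Array Int) (qa : List Int)
      (qb : List (Int × List Int)),
      BfsInv n k visited time prev qa qb →
      3 * visited.toList.count false + qa.length < fuel →
      (igetD (loopA k fuel qa visited time prev).1 k 0,
       (btLoop ((2 * k + 1).toNat + 1) (loopA k fuel qa visited time prev).2 k []).reverse)
        = loopB k fuel qb visited := by
  induction fuel with
  | zero => intro _ _ _ _ _ _ hm; omega
  | succ f ih =>
    intro visited time prev qa qb hI hm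
    obtain _ | ⟨current, rest⟩ := qa
    · exfalso
      have hall : ∀ d : Nat, n + (d : Int) ≤ k → V visited (n + (d : Int)) = true := by
        intro d
        induction d with
        | zero => intro _; simpa using hI.nvis
        | succ d ihd =>
          intro hdk
          have h1 : n + (d : Int) ≤ k := by push_cast at hdk; omega
          have h2 := ihd (by omega)
          have h3 := hI.prog (n + (d : Int)) (by omega) (by push_cast at hdk; omega) h2
          rcases h3 with h3 | h3
          · rw [show ((d + 1 : Nat) : Int) = ((d : Nat) + 1 : Int) by push_cast; ring,
              show n + ((d : Nat) + 1 : Int) = (n + (d : Int)) + 1 by ring]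
            exact h3
          · simp at h3
      have hVk : V visited k = true := by
        have := hall (k - n).toNat (by omega)
        rwa [show n + (((k - n).toNat : Nat) : Int) = k by omega] at this
      have := hI.kq hVk
      simp at this
    · obtain _ | ⟨⟨c2, p⟩, rest'⟩ := qb
      · exact absurd hI.qcorr (by simp)
      · have hqc := hI.qcorr
        simp only [List.map_cons] at hqc
        obtain ⟨hc2, hrest⟩ := List.cons.injEq _ _ _ _ ▸ hqc
        subst hc2
        obtain ⟨hc0, hclt, hcv⟩ := hI.qmem c2 (List.mem_cons_self ..)
        obtain ⟨l, hbt, hmem, hnd, htm⟩ := hI.chain c2 hc0 hclt hcv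
        have hbp : BT prev c2 p := hI.qpath (c2, p) (List.mem_cons_self ..)
        have hlp : l = p := BT_unique hbt hbp
        subst hlp
        by_cases hck : c2 = k
        · subst hck
          simp only [loopA, loopB, if_true]
          have hfuelbt : l.length ≤ (2 * c2 + 1).toNat + 1 := by
            have := nodup_bounded_length l (2 * c2 + 1).toNat hnd
              (fun x hx => ⟨(hmem x hx).1, by have := (hmem x hx).2.1; omega⟩)
            omega
          rw [bt_eval hbt (fun j hj => (hmem j hj).1) _ [] hfuelbt]
          simp only [List.nil_append, List.reverse_reverse]
          rw [htm]
        · simp only [loopA, loopB, if_neg hck]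
          have mid : Mid n k c2 l visited time prev rest rest' :=
            ⟨hI.lenv, hI.lent, hI.lenp, hrest,
             fun q hq => hI.qmem q (List.mem_cons_of_mem _ hq), hI.chain,
             fun qp hqp => hI.qpath qp (List.mem_cons_of_mem _ hqp),
             hc0, hcv, hbt, hmem, hnd, htm⟩
          obtain ⟨v', t', pr', qa', qb', eA, eB, m', mo, ⟨ext, hext⟩, f5, me, g8⟩ :=
            foldThree n k c2 l visited time prev rest rest' mid
          rw [eA, eB]
          simp only
          have hInv' : BfsInv n k v' t' pr' qa' qb' :=
            ⟨m'.lenv, m'.lent, m'.lenp, m'.qcorr, m'.qmem, m'.chain, m'.qpath,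
             ?_, mo _ hI.nvis, ?_⟩
          · exact ih v' t' pr' qa' qb' hInv' (by simp only [List.length_cons] at hm; omega)
          · -- kq
            intro hvk
            rcases g8 k hvk with hold | hin
            · have := hI.kq hold
              rcases List.mem_cons.mp this with hEq | hmem2
              · exact absurd hEq.symm hck
              · rw [hext]; exact List.mem_append_left _ hmem2
            · exact hin
          · -- prog
            intro i hni hik hvi
            rcases g8 i hvi with hold | hin
            · rcases hI.prog i hni hik hold with hv1 | hq2
              · exact Or.inl (mo _ hv1)
              · rcases List.mem_cons.mp hq2 with hEq | hmem2
                · subst hEq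
                  exact Or.inl (f5 (by omega) (by omega))
                · exact Or.inr (by rw [hext]; exact List.mem_append_left _ hmem2)
            · exact Or.inr hin
-- ===== VERDICT (by name: the statement is the Claim_ definition above) =====
theorem bfs_spec : Claim_equal_bfs := by
  intro n k _ hpre
  unfold Spec_bfs
  by_cases hnk : n ≥ k
  · simp [bfs, bfs_alt, hnk]
  · have hk : n < k := by omega
    have hn : 0 ≤ n := by
      rcases hpre with h | h
      · omega
      · exact h
    simp only [bfs, bfs_alt, if_neg hnk]
    have hmpos : (0:Int) < 2 * k + 1 := by omega
    have hlen : (Array.replicate (2 * k + 1).toNat (false : Bool)).size = (2 * k + 1).toNat := by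
      simp
    have hnm : n.toNat < (2 * k + 1).toNat := by omega
    have hVn : V (iset (Array.replicate (2 * k + 1).toNat false) n true) n = true := by
      simpa [V] using
        igetD_iset_self (Array.replicate (2 * k + 1).toNat false) n true false hn
          (by simpa using hnm)
    have hVonly : ∀ i, V (iset (Array.replicate (2 * k + 1).toNat false) n true) i = true →
        i = n := by
      intro i hi
      by_cases h : i = n
      · exact h
      · exfalso
        rw [V, igetD_iset_ne _ _ _ _ _ h, igetD_replicate] at hi
        exact Bool.false_ne_true hi
    have hbase : ∀ i : Int, igetD (Array.replicate (2 * k + 1).toNat (-1 : Int)) i (-1) = -1 :=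
      fun i => igetD_replicate _ _ _
    have hInv0 : BfsInv n k (iset (Array.replicate (2 * k + 1).toNat false) n true)
        (Array.replicate (2 * k + 1).toNat 0) (Array.replicate (2 * k + 1).toNat (-1))
        [n] [(n, [n])] := by
      refine ⟨?_, ?_, ?_, by simp, ?_, ?_, ?_, ?_, hVn, ?_⟩
      · rw [size_iset, hlen]; omega
      · rw [size_iset]; simp
      · rw [size_iset]; simp
      · intro q hq
        simp only [List.mem_singleton] at hq
        subst hq
        exact ⟨hn, by omega, hVn⟩
      · intro i _ _ hv
        have := hVonly i hv
        subst this
        refine ⟨[i], BT.base i (hbase i), ?_, by simp, ?_⟩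
        · intro j hj
          simp only [List.mem_singleton] at hj
          subst hj
          exact ⟨hn, by omega, hVn⟩
        · rw [igetD_replicate]; simp
      · intro qp hqp
        simp only [List.mem_singleton] at hqp
        subst hqp
        exact BT.base n (hbase n)
      · intro hvk
        exact absurd (hVonly k hvk) (by omega)
      · intro i _ _ hv
        exact Or.inr (by simp [hVonly i hv])
    have hset : (iset (Array.replicate (2 * k + 1).toNat (false : Bool)) n true).toList
        = (List.replicate (2 * k + 1).toNat false).set n.toNat true := by
      simp [iset, hn, Array.toList_setIfInBounds]
    have hcnt := count_set_true (List.replicate (2 * k + 1).toNat false) n.toNat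
      (by simpa using hnm) (by simp)
    have hcnt' : (List.replicate (2 * k + 1).toNat false).count false
        = (2 * k + 1).toNat := by simp
    exact mainLoop n k hk (3 * (2 * k + 1).toNat + 3) _ _ _ _ _ hInv0
      (by rw [hset]; simp only [List.length_singleton]; omega)
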